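-- pv_equiv track=rewrite | github.com/mylesturner1/CIV4000-Dissertation---Code- | Functions_CPTu_Cap_Copy.py | split_sublists
-- ===== SOURCE A (Python) =====
-- def split_sublists(list1, list2, list3, list4):
--     set1, set2, set3 = {}, {}, {}
--
--     counter1, counter2, counter3 = 0, 0, 0
--
--     div1, div2 = 3, 6  # Adjusted based on your splitting logic
--
--     for i in range(len(list1)):
--         if i < div1:
--             set1[counter1] = (list1[i], list2[i], list3[i], list4[i])
--             counter1 += 1
--         elif i < div2:
--             set2[counter2] = (list1[i], list2[i], list3[i], list4[i])
--             counter2 += 1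
--         else:
--             set3[counter3] = (list1[i], list2[i], list3[i], list4[i])
--             counter3 += 1
--
--     return set1, set2, set3
-- ===== SOURCE B (Python) =====
-- def split_sublists(list1, list2, list3, list4):
--     rows = [(list1[i], list2[i], list3[i], list4[i]) for i in range(len(list1))]
--     return dict(enumerate(rows[:3])), dict(enumerate(rows[3:6])), dict(enumerate(rows[6:]))
-- ===== Notes on version B (the rewrite author's own statement) =====
-- stated objective: simpler
-- what changed: Replaces the branch-per-element loop with three reset counters by a build-then-slice decomposition: materialise all rows once, then form the three dicts as enumerate of rows[:3], rows[3:6], rows[6:].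
import Mathlib
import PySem

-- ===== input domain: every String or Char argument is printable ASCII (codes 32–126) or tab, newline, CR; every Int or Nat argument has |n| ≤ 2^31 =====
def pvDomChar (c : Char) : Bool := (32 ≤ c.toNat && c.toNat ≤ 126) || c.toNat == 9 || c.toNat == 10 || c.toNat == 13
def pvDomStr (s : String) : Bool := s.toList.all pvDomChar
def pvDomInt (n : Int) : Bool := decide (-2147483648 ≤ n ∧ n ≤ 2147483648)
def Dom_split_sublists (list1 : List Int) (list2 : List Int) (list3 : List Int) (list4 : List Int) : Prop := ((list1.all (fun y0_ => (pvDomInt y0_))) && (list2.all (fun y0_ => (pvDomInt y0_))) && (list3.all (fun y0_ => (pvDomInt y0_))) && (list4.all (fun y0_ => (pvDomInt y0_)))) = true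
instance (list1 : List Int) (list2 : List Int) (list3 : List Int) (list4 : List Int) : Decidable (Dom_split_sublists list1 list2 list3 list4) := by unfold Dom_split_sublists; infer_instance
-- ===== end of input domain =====

-- B replaces A's branch-per-element loop (three dicts with reset counters) by build-then-slice:
-- all rows are built once, then the three dicts are enumerate of rows[:3], rows[3:6], rows[6:]. Objective: simpler.

-- ===== PORT A =====
-- inside Pre_ every index i < len(listk), so listk[i] is ported as pyGetD listk i 0 (the default is never reached on Pre_)
def split_sublists (list1 : List Int) (list2 : List Int) (list3 : List Int) (list4 : List Int) : (List (Int × Int × Int × Int × Int)) × (List (Int × Int × Int × Int × Int)) × (List (Int × Int × Int × Int × Int)) :=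
  let st := (PySem.List.pyRange 0 list1.length 1).foldl
    (fun (s : PySem.Dict Int (Int × Int × Int × Int) × PySem.Dict Int (Int × Int × Int × Int) × PySem.Dict Int (Int × Int × Int × Int) × Int × Int × Int) i =>
      let (set1, set2, set3, c1, c2, c3) := s
      let row := (PySem.List.pyGetD list1 i 0, PySem.List.pyGetD list2 i 0, PySem.List.pyGetD list3 i 0, PySem.List.pyGetD list4 i 0)
      if i < 3 then (set1.insert c1 row, set2, set3, c1 + 1, c2, c3)
      else if i < 6 then (set1, set2.insert c2 row, set3, c1, c2 + 1, c3)
      else (set1, set2, set3.insert c3 row, c1, c2, c3 + 1))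
    (PySem.Dict.empty, PySem.Dict.empty, PySem.Dict.empty, 0, 0, 0)
  (st.1.items, st.2.1.items, st.2.2.1.items)

-- ===== PORT B =====
def split_sublists_alt (list1 : List Int) (list2 : List Int) (list3 : List Int) (list4 : List Int) : (List (Int × Int × Int × Int × Int)) × (List (Int × Int × Int × Int × Int)) × (List (Int × Int × Int × Int × Int)) :=
  let rows := (PySem.List.pyRange 0 list1.length 1).map
    (fun i => (PySem.List.pyGetD list1 i 0, PySem.List.pyGetD list2 i 0, PySem.List.pyGetD list3 i 0, PySem.List.pyGetD list4 i 0))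
  (PySem.List.enumerate (PySem.List.slice rows none (some 3)) 0,
   PySem.List.enumerate (PySem.List.slice rows (some 3) (some 6)) 0,
   PySem.List.enumerate (PySem.List.slice rows (some 6) none) 0)

-- ===== PRECONDITION & SPEC =====
-- Pre_ excludes exactly the inputs where A raises IndexError: list2/list3/list4 shorter than list1 (B raises there too).
def Pre_split_sublists (list1 : List Int) (list2 : List Int) (list3 : List Int) (list4 : List Int) : Prop :=
  list1.length ≤ list2.length ∧ list1.length ≤ list3.length ∧ list1.length ≤ list4.length
instance (list1 : List Int) (list2 : List Int) (list3 : List Int) (list4 : List Int) : Decidable (Pre_split_sublists list1 list2 list3 list4) := by unfold Pre_split_sublists; infer_instance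

def pvWitness_split_sublists : List Int × List Int × List Int × List Int := ([1, 2, 3, 4, 5, 6, 7], [7, 6, 5, 4, 3, 2, 1], [0, 0, 0, 0, 0, 0, 0], [1, 1, 1, 1, 1, 1, 1])

def Spec_split_sublists (list1 : List Int) (list2 : List Int) (list3 : List Int) (list4 : List Int) (out : (List (Int × Int × Int × Int × Int)) × (List (Int × Int × Int × Int × Int)) × (List (Int × Int × Int × Int × Int))) : Prop := out = split_sublists_alt list1 list2 list3 list4
instance (list1 : List Int) (list2 : List Int) (list3 : List Int) (list4 : List Int) (out : (List (Int × Int × Int × Int × Int)) × (List (Int × Int × Int × Int × Int)) × (List (Int × Int × Int × Int × Int))) : Decidable (Spec_split_sublists list1 list2 list3 list4 out) := by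
  unfold Spec_split_sublists
  have h1 : DecidableEq (List (Int × Int × Int × Int × Int)) := inferInstance
  exact @instDecidableEqProd _ _ h1 (@instDecidableEqProd _ _ h1 h1) out (split_sublists_alt list1 list2 list3 list4)

-- ===== CLAIM (what is proved, stated in full; the proofs are below) =====
def Claim_equal_split_sublists : Prop := ∀ (list1 : List Int) (list2 : List Int) (list3 : List Int) (list4 : List Int), Dom_split_sublists list1 list2 list3 list4 → Pre_split_sublists list1 list2 list3 list4 → Spec_split_sublists list1 list2 list3 list4 (split_sublists list1 list2 list3 list4)

-- ===== LEMMAS AND PROOFS =====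

-- enumerate appends the next index at the end
theorem pv_enum_append {α : Type} (xs : List α) (v : α) (s : Int) :
    PySem.List.enumerate (xs ++ [v]) s = PySem.List.enumerate xs s ++ [(s + xs.length, v)] := by
  induction xs generalizing s with
  | nil => simp [PySem.List.enumerate_nil, PySem.List.enumerate_cons]
  | cons x xs ih =>
      simp [PySem.List.enumerate_cons, ih]
      ring_nf

-- every key produced by enumerate xs s is < s + xs.length
theorem pv_enum_key_lt {α : Type} (xs : List α) (s k : Int)
    (h : k ∈ (PySem.List.enumerate xs s).map Prod.fst) : k < s + xs.length := by
  induction xs generalizing s with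
  | nil => simp [PySem.List.enumerate_nil] at h
  | cons x xs ih =>
      simp [PySem.List.enumerate_cons] at h
      rcases h with h | h
      · simp; omega
      · have := ih (s + 1) (by simpa using h)
        simp at this ⊢; omega

theorem pv_contains_enum {α : Type} (xs : List α) (s k : Int) (h : s + xs.length ≤ k) :
    (PySem.Dict.mk (PySem.List.enumerate xs s) : PySem.Dict Int α).contains k = false := by
  by_contra hc
  have hk : k ∈ (PySem.Dict.mk (PySem.List.enumerate xs s) : PySem.Dict Int α).keys := by
    rw [← PySem.Dict.contains_iff_mem_keys]
    simpa using hc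
  have hm : k ∈ (PySem.List.enumerate xs s).map Prod.fst := by
    simpa [PySem.Dict.keys] using hk
  have := pv_enum_key_lt xs s k hm
  omega

-- inserting the fresh key xs.length into the enumerate-dict appends
theorem pv_insert_enum {α : Type} (xs : List α) (v : α) :
    (PySem.Dict.mk (PySem.List.enumerate xs 0) : PySem.Dict Int α).insert (xs.length : Int) v
      = PySem.Dict.mk (PySem.List.enumerate (xs ++ [v]) 0) := by
  apply PySem.Dict.ext
  rw [PySem.Dict.items_insert_of_not_contains _ v (pv_contains_enum xs 0 _ (by simp))]
  simp [pv_enum_append]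

-- the loop invariant: after processing range(n), the three dicts enumerate the three slices of
-- the first n rows, and the counters are those slices' lengths
theorem pv_loop_inv (list1 list2 list3 list4 : List Int) (n : Nat) :
    (PySem.List.pyRange 0 n 1).foldl
      (fun (s : PySem.Dict Int (Int × Int × Int × Int) × PySem.Dict Int (Int × Int × Int × Int) × PySem.Dict Int (Int × Int × Int × Int) × Int × Int × Int) i =>
        let (set1, set2, set3, c1, c2, c3) := s
        let row := (PySem.List.pyGetD list1 i 0, PySem.List.pyGetD list2 i 0, PySem.List.pyGetD list3 i 0, PySem.List.pyGetD list4 i 0)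
        if i < 3 then (set1.insert c1 row, set2, set3, c1 + 1, c2, c3)
        else if i < 6 then (set1, set2.insert c2 row, set3, c1, c2 + 1, c3)
        else (set1, set2, set3.insert c3 row, c1, c2, c3 + 1))
      (PySem.Dict.empty, PySem.Dict.empty, PySem.Dict.empty, 0, 0, 0)
    = (PySem.Dict.mk (PySem.List.enumerate (((PySem.List.pyRange 0 n 1).map (fun i => (PySem.List.pyGetD list1 i 0, PySem.List.pyGetD list2 i 0, PySem.List.pyGetD list3 i 0, PySem.List.pyGetD list4 i 0))).take 3) 0),
       PySem.Dict.mk (PySem.List.enumerate ((((PySem.List.pyRange 0 n 1).map (fun i => (PySem.List.pyGetD list1 i 0, PySem.List.pyGetD list2 i 0, PySem.List.pyGetD list3 i 0, PySem.List.pyGetD list4 i 0))).drop 3).take 3) 0),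
       PySem.Dict.mk (PySem.List.enumerate (((PySem.List.pyRange 0 n 1).map (fun i => (PySem.List.pyGetD list1 i 0, PySem.List.pyGetD list2 i 0, PySem.List.pyGetD list3 i 0, PySem.List.pyGetD list4 i 0))).drop 6) 0),
       ((((PySem.List.pyRange 0 n 1).map (fun i => (PySem.List.pyGetD list1 i 0, PySem.List.pyGetD list2 i 0, PySem.List.pyGetD list3 i 0, PySem.List.pyGetD list4 i 0))).take 3).length : Int),
       (((((PySem.List.pyRange 0 n 1).map (fun i => (PySem.List.pyGetD list1 i 0, PySem.List.pyGetD list2 i 0, PySem.List.pyGetD list3 i 0, PySem.List.pyGetD list4 i 0))).drop 3).take 3).length : Int),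
       ((((PySem.List.pyRange 0 n 1).map (fun i => (PySem.List.pyGetD list1 i 0, PySem.List.pyGetD list2 i 0, PySem.List.pyGetD list3 i 0, PySem.List.pyGetD list4 i 0))).drop 6).length : Int)) := by
  induction n with
  | zero => simp [PySem.Dict.empty]
  | succ n ih =>
      have hc : ((n + 1 : Nat) : Int) = (n : Int) + 1 := by push_cast; ring
      rw [hc, PySem.List.pyRange_one_succ_right (by positivity), List.foldl_append, List.map_append, ih]
      set L := (PySem.List.pyRange 0 (n : Int) 1).map (fun i => (PySem.List.pyGetD list1 i 0, PySem.List.pyGetD list2 i 0, PySem.List.pyGetD list3 i 0, PySem.List.pyGetD list4 i 0)) with hL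
      have hlen : L.length = n := by simp [hL, PySem.List.length_pyRange_one]
      simp only [List.map_cons, List.map_nil, List.foldl_cons, List.foldl_nil]
      by_cases h3 : n < 3
      · have e1 : L.take 3 = L := List.take_of_length_le (by omega)
        have e2 : L.drop 3 = [] := List.drop_eq_nil_of_le (by omega)
        have e3 : L.drop 6 = [] := List.drop_eq_nil_of_le (by omega)
        have f1 : ∀ v : Int × Int × Int × Int, (L ++ [v]).take 3 = L ++ [v] :=
          fun v => List.take_of_length_le (by simp; omega)
        have f2 : ∀ v : Int × Int × Int × Int, (L ++ [v]).drop 3 = [] :=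
          fun v => List.drop_eq_nil_of_le (by simp; omega)
        have f3 : ∀ v : Int × Int × Int × Int, (L ++ [v]).drop 6 = [] :=
          fun v => List.drop_eq_nil_of_le (by simp; omega)
        rw [f1, f2, f3, e1, e2, e3]
        rw [if_pos (show ((n : Int)) < 3 by omega)]
        rw [← hlen, pv_insert_enum]
        simp [hlen]
      · by_cases h6 : n < 6
        · have e1 : ∀ v : Int × Int × Int × Int, (L ++ [v]).take 3 = L.take 3 :=
            fun v => List.take_append_of_le_length (by omega)
          have e2 : ∀ v : Int × Int × Int × Int, (L ++ [v]).drop 3 = L.drop 3 ++ [v] :=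
            fun v => List.drop_append_of_le_length (by omega)
          have e3 : (L.drop 3).take 3 = L.drop 3 := List.take_of_length_le (by simp; omega)
          have e4 : ∀ v : Int × Int × Int × Int, (L.drop 3 ++ [v]).take 3 = L.drop 3 ++ [v] :=
            fun v => List.take_of_length_le (by simp; omega)
          have e5 : L.drop 6 = [] := List.drop_eq_nil_of_le (by omega)
          have e6 : ∀ v : Int × Int × Int × Int, (L ++ [v]).drop 6 = [] :=
            fun v => List.drop_eq_nil_of_le (by simp; omega)
          rw [e1, e2, e4, e3, e5, e6]
          rw [if_neg (show ¬ ((n : Int)) < 3 by omega), if_pos (show ((n : Int)) < 6 by omega)]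
          rw [pv_insert_enum]
          simp [hlen]
        · have e1 : ∀ v : Int × Int × Int × Int, (L ++ [v]).take 3 = L.take 3 :=
            fun v => List.take_append_of_le_length (by omega)
          have e2 : ∀ v : Int × Int × Int × Int, (L ++ [v]).drop 3 = L.drop 3 ++ [v] :=
            fun v => List.drop_append_of_le_length (by omega)
          have e3 : ∀ v : Int × Int × Int × Int, (L.drop 3 ++ [v]).take 3 = (L.drop 3).take 3 :=
            fun v => List.take_append_of_le_length (by simp; omega)
          have e4 : ∀ v : Int × Int × Int × Int, (L ++ [v]).drop 6 = L.drop 6 ++ [v] :=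
            fun v => List.drop_append_of_le_length (by omega)
          rw [e1, e2, e3, e4]
          rw [if_neg (show ¬ ((n : Int)) < 3 by omega), if_neg (show ¬ ((n : Int)) < 6 by omega)]
          rw [pv_insert_enum]
          simp [hlen]

-- ===== VERDICT (by name: the statement is the Claim_ definition above) =====
theorem split_sublists_spec : Claim_equal_split_sublists := by
  intro list1 list2 list3 list4 _hdom _hpre
  show split_sublists list1 list2 list3 list4 = split_sublists_alt list1 list2 list3 list4
  unfold split_sublists split_sublists_alt
  rw [pv_loop_inv]
  have s1 : ∀ rows : List (Int × Int × Int × Int), PySem.List.slice rows none (some (3 : Int)) = rows.take 3 := by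
    intro rows; rw [PySem.List.slice_to rows (by norm_num : (0:Int) ≤ 3)]; simp
  have s2 : ∀ rows : List (Int × Int × Int × Int), PySem.List.slice rows (some (3 : Int)) (some (6 : Int)) = (rows.drop 3).take 3 := by
    intro rows; rw [PySem.List.slice_toNat rows (by norm_num : (0:Int) ≤ 3) (by norm_num : (0:Int) ≤ 6)]; simp
  have s3 : ∀ rows : List (Int × Int × Int × Int), PySem.List.slice rows (some (6 : Int)) none = rows.drop 6 := by
    intro rows; rw [PySem.List.slice_from rows (by norm_num : (0:Int) ≤ 6)]; simp
  simp only [s1, s2, s3]
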